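-- pv_equiv track=rewrite | github.com/Wef2/ProjectEuler | python/problem048.py | last_ten
-- ===== SOURCE A (Python) =====
-- def last_ten(n):
--     value = 1
--     for i in range(1, n + 1):
--         value *= n
--         str_value = str(value)
--         if len(str_value) > 10:
--             str_value = str_value[len(str_value) - 10:len(str_value)]
--             value = int(str_value)
--     return value
-- ===== SOURCE B (Python) =====
-- def last_ten(n):
--     M = 10 ** 10
--     result = 1
--     base = n % M
--     e = n
--     while e > 0:
--         if e & 1:
--             result = result * base % M
--         base = base * base % M
--         e >>= 1
--     return result
-- ===== Notes on version B (the rewrite author's own statement) =====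
-- stated objective: faster
-- what changed: Replaces the n-iteration multiply-then-truncate-via-string loop by binary (square-and-multiply) modular exponentiation with modulus 10**10, O(log n) multiplications and no string conversions.
import Mathlib
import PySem

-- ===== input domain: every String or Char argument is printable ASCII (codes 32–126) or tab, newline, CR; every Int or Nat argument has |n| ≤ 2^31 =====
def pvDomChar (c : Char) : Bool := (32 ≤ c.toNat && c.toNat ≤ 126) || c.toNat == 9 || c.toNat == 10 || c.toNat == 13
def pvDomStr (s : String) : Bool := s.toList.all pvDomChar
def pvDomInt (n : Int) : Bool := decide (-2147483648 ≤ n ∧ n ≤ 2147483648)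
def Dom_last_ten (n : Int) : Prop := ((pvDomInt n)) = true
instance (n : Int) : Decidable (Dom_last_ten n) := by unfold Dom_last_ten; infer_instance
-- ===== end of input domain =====

-- B replaces A's n-step multiply-and-truncate-through-strings loop by square-and-multiply
-- modular exponentiation mod 10^10 (objective: faster — O(log n) multiplications, no strings).

-- ===== PORT A =====
-- int(str_value): hand-ported decimal parser, exact on the NONEMPTY ALL-DIGIT strings that
-- str(value) produces here (value is always ≥ 0 in A's loop); the general primitive is
-- PySem.Int.ofStr?, whose parsing internals are private and hence closed to the proofs below.
def pyIntOfDigits (cs : List Char) : Int :=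
  cs.foldl (fun a c => a * 10 + ((c.toNat : Int) - 48)) 0

-- one iteration of A's 'for i in range(1, n+1)' body; str(value) is ported on the char-list
-- side (PySem.Int.toChars / PySem.Chars.len / PySem.List.slice), as PYSEM prescribes for proofs
def lastTenBody (n value : Int) : Int :=
  let value := value * n
  let str_value := PySem.Int.toChars value
  if PySem.Chars.len str_value > 10 then
    pyIntOfDigits (PySem.List.slice str_value (some (PySem.Chars.len str_value - 10))
      (some (PySem.Chars.len str_value)))
  else value

def last_ten (n : Int) : Int :=
  (PySem.List.pyRange 1 (n + 1) 1).foldl (fun value _i => lastTenBody n value) 1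

-- ===== PORT B =====
-- the 'while e > 0' square-and-multiply loop of Source B (M = 10**10; 'e >>= 1' is 'e >>> 1')
def powLoop (result base e : Int) : Int :=
  if 0 < e then
    powLoop (if PySem.Int.band e 1 ≠ 0 then PySem.Int.mod (result * base) 10000000000 else result)
            (PySem.Int.mod (base * base) 10000000000)
            (e >>> (1 : Nat))
  else result
termination_by e.toNat
decreasing_by
  rename_i h
  have : e >>> (1 : Nat) = e / 2 := by
    rw [Int.shiftRight_eq_div_pow]; norm_num
  omega

def last_ten_alt (n : Int) : Int :=
  powLoop 1 (PySem.Int.mod n 10000000000) n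

-- ===== PRECONDITION & SPEC =====
def Spec_last_ten (n : Int) (out : Int) : Prop := out = last_ten_alt n
instance (n : Int) (out : Int) : Decidable (Spec_last_ten n out) := by unfold Spec_last_ten; infer_instance

-- ===== CLAIM (what is proved, stated in full; the proofs are below) =====
def Claim_equal_last_ten : Prop := ∀ (n : Int), Dom_last_ten n → Spec_last_ten n (last_ten n)

-- ===== LEMMAS AND PROOFS =====

-- decimal digits of m, most significant first (the char list str(m) prints for m ≥ 0)
def repChars (m : Nat) : List Char :=
  if _h : m < 10 then [Nat.digitChar m]
  else repChars (m / 10) ++ [Nat.digitChar (m % 10)]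
termination_by m
decreasing_by exact Nat.div_lt_self (by omega) (by norm_num)

theorem toDigitsCore_eq_repChars :
    ∀ (fuel m : Nat) (ds : List Char), m < fuel →
      Nat.toDigitsCore 10 fuel m ds = repChars m ++ ds := by
  intro fuel
  induction fuel with
  | zero => intro m ds h; omega
  | succ fuel ih =>
    intro m ds h
    by_cases h10 : m / 10 = 0
    · have hm : m < 10 := by omega
      rw [show repChars m = [Nat.digitChar m] from by rw [repChars, dif_pos hm]]
      conv_lhs => rw [Nat.toDigitsCore]
      simp [h10, Nat.mod_eq_of_lt hm]
    · have step : Nat.toDigitsCore 10 (fuel + 1) m ds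
          = Nat.toDigitsCore 10 fuel (m / 10) ((m % 10).digitChar :: ds) := by
        conv_lhs => rw [Nat.toDigitsCore]
        simp [h10]
      rw [step, ih (m / 10) _ (by omega)]
      rw [show repChars m = repChars (m / 10) ++ [(m % 10).digitChar] from by
        rw [repChars, dif_neg (by omega)]]
      simp

theorem toChars_eq_repChars (v : Int) (h : 0 ≤ v) :
    PySem.Int.toChars v = repChars v.toNat := by
  rw [PySem.Int.toChars, if_neg (by omega)]
  rw [Nat.toDigits, toDigitsCore_eq_repChars _ _ _ (by omega)]
  simp

theorem lt_pow_repChars_length (m : Nat) : m < 10 ^ (repChars m).length := by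
  induction m using Nat.strong_induction_on with
  | _ m ih =>
    rw [repChars]
    split
    · simpa
    · rename_i h
      have ihd := ih (m / 10) (Nat.div_lt_self (by omega) (by norm_num))
      simp only [List.length_append, List.length_cons, List.length_nil]
      rw [pow_succ]
      omega

theorem digitChar_val (d : Nat) (h : d < 10) :
    ((Nat.digitChar d).toNat : Int) - 48 = (d : Int) := by
  interval_cases d <;> rfl

theorem pyIntOfDigits_append (xs : List Char) (c : Char) :
    pyIntOfDigits (xs ++ [c]) = pyIntOfDigits xs * 10 + ((c.toNat : Int) - 48) := by
  simp [pyIntOfDigits, List.foldl_append]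

theorem pyIntOfDigits_repChars (m : Nat) :
    pyIntOfDigits (repChars m) = (m : Int) := by
  induction m using Nat.strong_induction_on with
  | _ m ih =>
    rw [repChars]
    split
    · rename_i h
      simp [pyIntOfDigits, digitChar_val m h]
    · rename_i h
      rw [pyIntOfDigits_append, ih (m / 10) (Nat.div_lt_self (by omega) (by norm_num)),
        digitChar_val (m % 10) (by omega)]
      push_cast
      omega

theorem pyIntOfDigits_drop (m : Nat) : ∀ (j : Nat), 1 ≤ j →
    pyIntOfDigits ((repChars m).drop ((repChars m).length - j)) = ((m % 10 ^ j : Nat) : Int) := by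
  induction m using Nat.strong_induction_on with
  | _ m ih =>
    intro j hj
    by_cases hlen : (repChars m).length ≤ j
    · rw [Nat.sub_eq_zero_of_le hlen, List.drop_zero, pyIntOfDigits_repChars]
      have : m < 10 ^ j :=
        lt_of_lt_of_le (lt_pow_repChars_length m) (Nat.pow_le_pow_right (by norm_num) hlen)
      rw [Nat.mod_eq_of_lt this]
    · -- j < length, so m ≥ 10 (a one-digit m has a length-1 representation)
      have hm : 10 ≤ m := by
        by_contra hc
        have : (repChars m).length = 1 := by
          rw [repChars, dif_pos (by omega)]; rfl
        omega
      have hdiv : m / 10 < m := Nat.div_lt_self (by omega) (by norm_num)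
      have hrec : repChars m = repChars (m / 10) ++ [Nat.digitChar (m % 10)] := by
        rw [repChars, dif_neg (by omega)]
      have hlA : (repChars m).length = (repChars (m / 10)).length + 1 := by rw [hrec]; simp
      rcases Nat.lt_or_ge 1 j with hj2 | hj1
      · -- 2 ≤ j
        rw [hrec,
          show (repChars (m / 10) ++ [Nat.digitChar (m % 10)]).length
              = (repChars (m / 10)).length + 1 from by simp,
          List.drop_append_of_le_length (show (repChars (m / 10)).length + 1 - j ≤ _ by omega),
          pyIntOfDigits_append,
          show (repChars (m / 10)).length + 1 - j = (repChars (m / 10)).length - (j - 1) from by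
            omega,
          ih (m / 10) hdiv (j - 1) (by omega),
          digitChar_val (m % 10) (by omega)]
        rw [show 10 ^ j = 10 * 10 ^ (j - 1) from by rw [← pow_succ']; congr 1; omega,
          Nat.mod_mul]
        push_cast
        ring
      · -- j = 1
        have hj' : j = 1 := by omega
        subst hj'
        rw [hrec,
          show (repChars (m / 10) ++ [Nat.digitChar (m % 10)]).length - 1
              = (repChars (m / 10)).length from by simp,
          List.drop_left]
        simp [pyIntOfDigits, digitChar_val (m % 10) (by omega)]

-- one A-iteration is multiplication followed by reduction mod 10^10
theorem lastTenBody_eq (n value : Int) (hv : 0 ≤ value) (hn : 1 ≤ n) :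
    lastTenBody n value = value * n % 10000000000 := by
  have hvn : 0 ≤ value * n := mul_nonneg hv (by omega)
  have hcast : (((value * n).toNat : Int)) = value * n := Int.toNat_of_nonneg hvn
  simp only [lastTenBody, toChars_eq_repChars _ hvn, PySem.Chars.len_eq]
  set m := (value * n).toNat with hm
  by_cases hlen : ((repChars m).length : Int) > 10
  · rw [if_pos hlen]
    rw [PySem.List.slice_toNat _ (by omega) (by omega)]
    rw [show (((repChars m).length : Int) - 10).toNat = (repChars m).length - 10 by omega,
      show ((repChars m).length : Int).toNat = (repChars m).length by omega]
    have hdlen : ((repChars m).drop ((repChars m).length - 10)).length = 10 := by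
      rw [List.length_drop]; omega
    rw [List.take_of_length_le (by rw [hdlen]; omega), pyIntOfDigits_drop m 10 (by norm_num)]
    push_cast
    rw [hcast]
  · rw [if_neg hlen]
    have : m < 10 ^ 10 := by
      have h1 := lt_pow_repChars_length m
      have hle : (repChars m).length ≤ 10 := by omega
      exact lt_of_lt_of_le h1 (Nat.pow_le_pow_right (by norm_num) hle)
    rw [Int.emod_eq_of_lt hvn (by omega)]

theorem foldA (n : Int) (hn : 1 ≤ n) :
    ∀ (l : List Int) (v : Int), 0 ≤ v → v < 10000000000 →
      l.foldl (fun value _i => lastTenBody n value) v = v * n ^ l.length % 10000000000 := by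
  intro l
  induction l with
  | nil =>
    intro v h0 h1
    simp [Int.emod_eq_of_lt h0 h1]
  | cons x l ihl =>
    intro v h0 h1
    rw [List.foldl_cons, lastTenBody_eq n v h0 hn,
      ihl _ (Int.emod_nonneg _ (by norm_num)) (Int.emod_lt_of_pos _ (by norm_num))]
    simp only [List.length_cons]
    have hmq : (v * n % 10000000000) * n ^ l.length ≡ v * n ^ (l.length + 1) [ZMOD 10000000000] := by
      calc (v * n % 10000000000) * n ^ l.length
          ≡ (v * n) * n ^ l.length [ZMOD 10000000000] :=
            Int.ModEq.mul (Int.emod_emod_of_dvd _ dvd_rfl) (Int.ModEq.refl _)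
        _ = v * n ^ (l.length + 1) := by ring
    exact hmq

-- the square-and-multiply loop computes result * base^e reduced mod 10^10
theorem powLoop_eq :
    ∀ (k : Nat) (e : Int), e.toNat = k → 0 ≤ e →
      ∀ (result base : Int), 0 ≤ result → result < 10000000000 → 0 ≤ base →
        powLoop result base e = result * base ^ e.toNat % 10000000000 := by
  intro k
  induction k using Nat.strong_induction_on with
  | _ k ih =>
    intro e hk he result base h0 h1 hb
    rw [powLoop]
    by_cases hpos : 0 < e
    · rw [if_pos hpos]
      have hsh : e >>> (1 : Nat) = e / 2 := by
        rw [Int.shiftRight_eq_div_pow]; norm_num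
      have hband : PySem.Int.band e 1 = e % 2 := by
        rw [PySem.Int.band_one, PySem.Int.mod_eq_emod_of_pos (by norm_num)]
      simp only [hsh, hband,
        PySem.Int.mod_eq_emod_of_pos (show (0 : Int) < 10000000000 by norm_num)]
      have hih := ih (e / 2).toNat (by omega) (e / 2) rfl (by omega)
      by_cases hodd : e % 2 = 0
      · rw [if_neg (show ¬(e % 2 ≠ 0) from by omega)]
        rw [hih result _ h0 h1 (Int.emod_nonneg _ (by norm_num))]
        have h2 : e.toNat = 2 * (e / 2).toNat := by omega
        rw [h2, pow_mul, pow_two]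
        exact Int.ModEq.mul (Int.ModEq.refl _)
          (Int.ModEq.pow _ (Int.emod_emod_of_dvd _ dvd_rfl))
      · rw [if_pos hodd]
        rw [hih _ _ (Int.emod_nonneg _ (by norm_num)) (Int.emod_lt_of_pos _ (by norm_num))
          (Int.emod_nonneg _ (by norm_num))]
        have h2 : e.toNat = 2 * (e / 2).toNat + 1 := by omega
        calc (result * base % 10000000000) * (base * base % 10000000000) ^ (e / 2).toNat
              % 10000000000
            = (result * base) * (base * base) ^ (e / 2).toNat % 10000000000 :=
              Int.ModEq.mul (Int.emod_emod_of_dvd _ dvd_rfl)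
                (Int.ModEq.pow _ (Int.emod_emod_of_dvd _ dvd_rfl))
          _ = result * base ^ e.toNat % 10000000000 := by rw [h2]; congr 1; ring
    · rw [if_neg hpos]
      have he0 : e = 0 := by omega
      rw [he0]
      simp [Int.emod_eq_of_lt h0 h1]

theorem last_ten_eq_alt (n : Int) : last_ten n = last_ten_alt n := by
  by_cases hn : n ≤ 0
  · rw [last_ten, PySem.List.pyRange_one_eq_nil (by omega), List.foldl_nil,
      last_ten_alt, powLoop, if_neg (by omega)]
  · have hn1 : 1 ≤ n := by omega
    rw [last_ten, foldA n hn1 _ 1 (by norm_num) (by norm_num),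
      PySem.List.length_pyRange_one]
    rw [last_ten_alt, PySem.Int.mod_eq_emod_of_pos (by norm_num),
      powLoop_eq n.toNat n rfl (by omega) 1 (n % 10000000000) (by norm_num) (by norm_num)
        (Int.emod_nonneg _ (by norm_num))]
    rw [show (n + 1 - 1).toNat = n.toNat by omega]
    have : n ^ n.toNat ≡ (n % 10000000000) ^ n.toNat [ZMOD 10000000000] :=
      (Int.ModEq.pow _ (Int.emod_emod_of_dvd _ dvd_rfl)).symm
    calc 1 * n ^ n.toNat % 10000000000
        = 1 * (n % 10000000000) ^ n.toNat % 10000000000 :=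
          Int.ModEq.mul (Int.ModEq.refl _) this
      _ = _ := rfl

-- ===== VERDICT (by name: the statement is the Claim_ definition above) =====
theorem last_ten_spec : Claim_equal_last_ten := by
  intro n _
  exact last_ten_eq_alt n
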